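-- pv_equiv track=rewrite | github.com/i-to-the-power-i/causal-lz-p-decision-tree | DistanceDecisionTree.py | _lz_complexity_penalty
-- ===== SOURCE A (Python) =====
-- def _lz_complexity_penalty(sequence_gr, sequence_cmp):
--
--         """Lempel-Ziv complexity for a binary sequence, in simple Python code. """
--         sub_strings_gr = set()
--         sub_strings_cmp = set()
--         sub_strings_penalty = set()
--         n = len(sequence_gr)
--         ind = 0
--         inc = 1
--         #find grammar of x
--         while True:
--             if ind + inc > len(sequence_gr):
--                 break
--             sub_str = sequence_gr[ind : ind + inc]
--             if sub_str in sub_strings_gr: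
--                 inc += 1
--             else:
--                 sub_strings_gr.add(sub_str)
--                 ind += inc
--                 inc = 1
--         #use it to compress y
--         ind = 0
--         inc = 1
--
--         while True:
--             if ind + inc > len(sequence_cmp):
--                 break
--             sub_str = sequence_cmp[ind : ind + inc]
--             if sub_str in sub_strings_gr and sub_str not in sub_strings_cmp:
--                 sub_strings_cmp.add(sub_str)
--                 ind += inc
--                 inc = 1
--             elif sub_str in sub_strings_cmp:
--                 inc += 1
--             else:
--                 if sub_str not in sub_strings_penalty:
--                   sub_strings_penalty.add(sub_str)
--                   ind += inc
--                   inc = 1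
--                 else:
--                   inc += 1
--
--         return len(sub_strings_gr)-len(sub_strings_cmp)+len(sub_strings_penalty)
-- ===== SOURCE B (Python) =====
-- def _lz_complexity_penalty(sequence_gr, sequence_cmp):
--     """Same penalty, computed by a single character-at-a-time pass per string
--     with a growing current-phrase buffer instead of index arithmetic and
--     repeated slicing."""
--     gr = set()
--     cur = ""
--     for ch in sequence_gr:
--         cur += ch
--         if cur not in gr:
--             gr.add(cur)
--             cur = ""
--     cmp_ = set()
--     pen = set()
--     cur = ""
--     for ch in sequence_cmp:
--         cur += ch
--         if cur in gr and cur not in cmp_: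
--             cmp_.add(cur)
--             cur = ""
--         elif cur in cmp_:
--             continue
--         elif cur not in pen:
--             pen.add(cur)
--             cur = ""
--     return len(gr) - len(cmp_) + len(pen)
-- ===== Notes on version B (the rewrite author's own statement) =====
-- stated objective: simpler
-- what changed: Replaced the two index-arithmetic while-loops that repeatedly slice sequence[ind:ind+inc] with a single for-each-character pass per string that grows a current-phrase buffer and resets it when a phrase is emitted.
import Mathlib
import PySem

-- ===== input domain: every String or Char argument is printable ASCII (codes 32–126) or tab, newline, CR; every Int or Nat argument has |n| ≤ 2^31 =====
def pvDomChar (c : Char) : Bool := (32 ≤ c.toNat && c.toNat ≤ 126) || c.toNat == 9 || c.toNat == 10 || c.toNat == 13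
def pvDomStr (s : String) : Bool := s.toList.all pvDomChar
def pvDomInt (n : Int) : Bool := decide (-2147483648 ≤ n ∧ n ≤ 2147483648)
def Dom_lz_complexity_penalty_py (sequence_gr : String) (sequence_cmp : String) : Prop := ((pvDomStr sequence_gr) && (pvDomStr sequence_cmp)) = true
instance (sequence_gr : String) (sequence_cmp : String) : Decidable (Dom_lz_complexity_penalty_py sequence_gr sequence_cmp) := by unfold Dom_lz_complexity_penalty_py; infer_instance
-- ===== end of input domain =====

-- B replaces A's index/slice while-loops by one for-each-character pass per string with a
-- current-phrase buffer; objective: simpler (no index arithmetic, no slicing), same result.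

-- ===== PORT A =====
-- first while loop of A: state (ind, inc) and the set of grammar phrases
def lzGrLoop (s : List Char) (ind inc : Nat) (grS : PySem.Set (List Char)) :
    PySem.Set (List Char) :=
  if ind + inc > s.length then grS
  else
    let sub := PySem.List.slice s (some (ind : Int)) (some ((ind : Int) + (inc : Int)))
    if PySem.Set.contains grS sub then lzGrLoop s ind (inc + 1) grS
    else lzGrLoop s (ind + inc) 1 (PySem.Set.add grS sub)
termination_by 2 * s.length + 2 - (2 * ind + inc)
decreasing_by all_goals omega

-- second while loop of A: state (ind, inc) and the cmp / penalty sets (grS is read-only)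
def lzCmpLoop (s : List Char) (ind inc : Nat) (grS cmpS penS : PySem.Set (List Char)) :
    PySem.Set (List Char) × PySem.Set (List Char) :=
  if ind + inc > s.length then (cmpS, penS)
  else
    let sub := PySem.List.slice s (some (ind : Int)) (some ((ind : Int) + (inc : Int)))
    if PySem.Set.contains grS sub && !PySem.Set.contains cmpS sub then
      lzCmpLoop s (ind + inc) 1 grS (PySem.Set.add cmpS sub) penS
    else if PySem.Set.contains cmpS sub then
      lzCmpLoop s ind (inc + 1) grS cmpS penS
    else
      if !PySem.Set.contains penS sub then
        lzCmpLoop s (ind + inc) 1 grS cmpS (PySem.Set.add penS sub)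
      else
        lzCmpLoop s ind (inc + 1) grS cmpS penS
termination_by 2 * s.length + 2 - (2 * ind + inc)
decreasing_by all_goals omega

def lz_complexity_penalty_py (sequence_gr : String) (sequence_cmp : String) : Int :=
  let grS := lzGrLoop sequence_gr.toList 0 1 PySem.Set.empty
  let cp := lzCmpLoop sequence_cmp.toList 0 1 grS PySem.Set.empty PySem.Set.empty
  (PySem.Set.len grS : Int) - (PySem.Set.len cp.1 : Int) + (PySem.Set.len cp.2 : Int)

-- ===== PORT B =====
-- first for-loop of B: consume one character at a time, growing the buffer `cur`
def bGrLoop (chars : List Char) (cur : List Char) (grS : PySem.Set (List Char)) :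
    PySem.Set (List Char) :=
  match chars with
  | [] => grS
  | c :: rest =>
    let cur' := cur ++ [c]
    if PySem.Set.contains grS cur' then bGrLoop rest cur' grS
    else bGrLoop rest [] (PySem.Set.add grS cur')

-- second for-loop of B
def bCmpLoop (chars : List Char) (cur : List Char) (grS cmpS penS : PySem.Set (List Char)) :
    PySem.Set (List Char) × PySem.Set (List Char) :=
  match chars with
  | [] => (cmpS, penS)
  | c :: rest =>
    let cur' := cur ++ [c]
    if PySem.Set.contains grS cur' && !PySem.Set.contains cmpS cur' then
      bCmpLoop rest [] grS (PySem.Set.add cmpS cur') penS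
    else if PySem.Set.contains cmpS cur' then
      bCmpLoop rest cur' grS cmpS penS
    else if !PySem.Set.contains penS cur' then
      bCmpLoop rest [] grS cmpS (PySem.Set.add penS cur')
    else
      bCmpLoop rest cur' grS cmpS penS

def lz_complexity_penalty_py_alt (sequence_gr : String) (sequence_cmp : String) : Int :=
  let grS := bGrLoop sequence_gr.toList [] PySem.Set.empty
  let cp := bCmpLoop sequence_cmp.toList [] grS PySem.Set.empty PySem.Set.empty
  (PySem.Set.len grS : Int) - (PySem.Set.len cp.1 : Int) + (PySem.Set.len cp.2 : Int)

-- ===== PRECONDITION & SPEC =====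
def Spec_lz_complexity_penalty_py (sequence_gr : String) (sequence_cmp : String) (out : Int) : Prop := out = lz_complexity_penalty_py_alt sequence_gr sequence_cmp
instance (sequence_gr : String) (sequence_cmp : String) (out : Int) : Decidable (Spec_lz_complexity_penalty_py sequence_gr sequence_cmp out) := by unfold Spec_lz_complexity_penalty_py; infer_instance

-- ===== CLAIM (what is proved, stated in full; the proofs are below) =====
def Claim_equal_lz_complexity_penalty_py : Prop := ∀ (sequence_gr : String) (sequence_cmp : String), Dom_lz_complexity_penalty_py sequence_gr sequence_cmp → Spec_lz_complexity_penalty_py sequence_gr sequence_cmp (lz_complexity_penalty_py sequence_gr sequence_cmp)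

-- ===== LEMMAS AND PROOFS =====

-- the slice A inspects at state (ind, m+1) is B's buffer extended by the next character
theorem slice_step (s : List Char) (ind m : Nat) (h2 : ind + m < s.length) :
    PySem.List.slice s (some (ind : Int)) (some ((ind : Int) + ((m + 1 : Nat) : Int))) =
      (s.drop ind).take m ++ [s[ind + m]'h2] := by
  rw [PySem.List.slice_natCast_add]
  have hm : m < (s.drop ind).length := by simp; omega
  rw [List.take_add_one, List.getElem?_eq_getElem hm]
  simp [List.getElem_drop]

theorem gr_loops_eq (rest : List Char) : ∀ (s : List Char) (ind m : Nat)
    (S : PySem.Set (List Char)), ind + m ≤ s.length → rest = s.drop (ind + m) →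
    lzGrLoop s ind (m + 1) S = bGrLoop rest ((s.drop ind).take m) S := by
  induction rest with
  | nil =>
    intro s ind m S h2 hr
    have hlen : s.length ≤ ind + m := by
      by_contra hlt
      have := congrArg List.length hr
      simp [List.length_drop] at this
      omega
    rw [lzGrLoop, if_pos (by omega), bGrLoop]
  | cons c rest ih =>
    intro s ind m S h2 hr
    have hk : ind + m < s.length := by
      by_contra hge
      rw [List.drop_eq_nil_of_le (by omega)] at hr
      exact (List.cons_ne_nil c rest) hr
    rw [List.drop_eq_getElem_cons hk] at hr
    injection hr with hc hrest
    subst hc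
    rw [lzGrLoop, if_neg (by omega)]
    rw [bGrLoop]
    simp only [slice_step s ind m hk]
    by_cases hmem :
        PySem.Set.contains S ((s.drop ind).take m ++ [s[ind + m]'hk]) = true
    · rw [if_pos hmem, if_pos hmem]
      rw [ih s ind (m + 1) S (by omega) (by rw [hrest]; try (congr 1 <;> omega))]
      congr 1
      have h' : m < (s.drop ind).length := by simp; omega
      rw [List.take_add_one, List.getElem?_eq_getElem h']
      simp [List.getElem_drop]
    · rw [if_neg hmem, if_neg hmem]
      rw [ih s (ind + (m + 1)) 0 _ (by omega) (by rw [hrest]; try (congr 1 <;> omega))]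
      simp

theorem cmp_loops_eq (rest : List Char) : ∀ (s : List Char) (ind m : Nat)
    (G C P : PySem.Set (List Char)), ind + m ≤ s.length → rest = s.drop (ind + m) →
    lzCmpLoop s ind (m + 1) G C P = bCmpLoop rest ((s.drop ind).take m) G C P := by
  induction rest with
  | nil =>
    intro s ind m G C P h2 hr
    have hlen : s.length ≤ ind + m := by
      by_contra hlt
      have := congrArg List.length hr
      simp [List.length_drop] at this
      omega
    rw [lzCmpLoop, if_pos (by omega), bCmpLoop]
  | cons c rest ih =>
    intro s ind m G C P h2 hr
    have hk : ind + m < s.length := by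
      by_contra hge
      rw [List.drop_eq_nil_of_le (by omega)] at hr
      exact (List.cons_ne_nil c rest) hr
    rw [List.drop_eq_getElem_cons hk] at hr
    injection hr with hc hrest
    subst hc
    have hext : (s.drop ind).take (m + 1) =
        (s.drop ind).take m ++ [s[ind + m]'hk] := by
      have h' : m < (s.drop ind).length := by simp; omega
      rw [List.take_add_one, List.getElem?_eq_getElem h']
      simp [List.getElem_drop]
    rw [lzCmpLoop, if_neg (by omega)]
    rw [bCmpLoop]
    simp only [slice_step s ind m hk]
    set cur' := (s.drop ind).take m ++ [s[ind + m]'hk] with hcur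
    by_cases hb1 : (PySem.Set.contains G cur' && !PySem.Set.contains C cur') = true
    · rw [if_pos hb1, if_pos hb1]
      rw [ih s (ind + (m + 1)) 0 G _ P (by omega) (by rw [hrest]; try (congr 1 <;> omega))]
      simp
    · rw [if_neg hb1, if_neg hb1]
      by_cases hb2 : PySem.Set.contains C cur' = true
      · rw [if_pos hb2, if_pos hb2]
        rw [ih s ind (m + 1) G C P (by omega) (by rw [hrest]; try (congr 1 <;> omega))]
        rw [hext]
      · rw [if_neg hb2, if_neg hb2]
        by_cases hb3 : (!PySem.Set.contains P cur') = true
        · rw [if_pos hb3, if_pos hb3]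
          rw [ih s (ind + (m + 1)) 0 G C _ (by omega) (by rw [hrest]; try (congr 1 <;> omega))]
          simp
        · rw [if_neg hb3, if_neg hb3]
          rw [ih s ind (m + 1) G C P (by omega) (by rw [hrest]; try (congr 1 <;> omega))]
          rw [hext]

-- ===== VERDICT (by name: the statement is the Claim_ definition above) =====
theorem lz_complexity_penalty_py_spec : Claim_equal_lz_complexity_penalty_py := by
  intro g c _
  unfold Spec_lz_complexity_penalty_py lz_complexity_penalty_py lz_complexity_penalty_py_alt
  have h1 : lzGrLoop g.toList 0 1 PySem.Set.empty = bGrLoop g.toList [] PySem.Set.empty := by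
    simpa using gr_loops_eq g.toList g.toList 0 0 PySem.Set.empty (by omega) (by simp)
  have h2 : ∀ G, lzCmpLoop c.toList 0 1 G PySem.Set.empty PySem.Set.empty =
      bCmpLoop c.toList [] G PySem.Set.empty PySem.Set.empty := fun G => by
    simpa using cmp_loops_eq c.toList c.toList 0 0 G PySem.Set.empty PySem.Set.empty
      (by omega) (by simp)
  simp only [h1, h2]
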